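-- pv_equiv track=rewrite | github.com/Dnaux-dev/Olive | app/services/pill_service.py | _shapes_similar
-- ===== SOURCE A (Python) =====
-- def _shapes_similar(shape1: str, shape2: str) -> bool:
--     """Check if two shapes are similar"""
--     similar_groups = [
--         {'round', 'oval'},
--         {'capsule', 'oblong'},
--         {'square', 'round'}
--     ]
--
--     for group in similar_groups:
--         if shape1 in group and shape2 in group:
--             return True
--
--     return False
-- ===== SOURCE B (Python) =====
-- _NEIGHBORS = {
--     'round': {'round', 'oval', 'square'},
--     'oval': {'oval', 'round'},
--     'capsule': {'capsule', 'oblong'},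
--     'oblong': {'oblong', 'capsule'},
--     'square': {'square', 'round'},
-- }
--
--
-- def _shapes_similar(shape1: str, shape2: str) -> bool:
--     """Check if two shapes are similar"""
--     return shape2 in _NEIGHBORS.get(shape1, set())
-- ===== Notes on version B (the rewrite author's own statement) =====
-- stated objective: idiomatic
-- what changed: Replaces the query-time scan over similarity groups by a precomputed adjacency table mapping each shape to the union of the groups containing it (including itself); the call is a single dict lookup plus membership test.
import Mathlib
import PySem

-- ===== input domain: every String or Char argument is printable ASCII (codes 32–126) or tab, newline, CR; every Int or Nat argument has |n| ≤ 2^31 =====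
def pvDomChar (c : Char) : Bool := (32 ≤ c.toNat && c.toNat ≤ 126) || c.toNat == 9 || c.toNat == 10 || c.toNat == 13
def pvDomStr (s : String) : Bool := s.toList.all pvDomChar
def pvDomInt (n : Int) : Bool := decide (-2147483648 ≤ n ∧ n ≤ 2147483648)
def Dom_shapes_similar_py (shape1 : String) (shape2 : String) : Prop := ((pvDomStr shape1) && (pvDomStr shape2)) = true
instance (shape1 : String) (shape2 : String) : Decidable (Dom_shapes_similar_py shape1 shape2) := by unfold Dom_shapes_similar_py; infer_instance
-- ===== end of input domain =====

-- B replaces A's query-time scan over similarity groups by a precomputed adjacency table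
-- (shape → union of the groups containing it); objective: idiomatic.

-- ===== PORT A =====
-- the 'for group in similar_groups: if shape1 in group and shape2 in group: return True' loop
def shapesSimilarLoopA (shape1 shape2 : String) : List (PySem.Set String) → Bool
  | [] => false
  | group :: rest =>
    if PySem.Set.contains group shape1 && PySem.Set.contains group shape2 then true
    else shapesSimilarLoopA shape1 shape2 rest

def shapes_similar_py (shape1 : String) (shape2 : String) : Bool :=
  let similar_groups : List (PySem.Set String) :=
    [PySem.Set.ofList ["round", "oval"],
     PySem.Set.ofList ["capsule", "oblong"],
     PySem.Set.ofList ["square", "round"]]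
  shapesSimilarLoopA shape1 shape2 similar_groups

-- ===== PORT B =====
def shapesNeighbors : PySem.Dict String (PySem.Set String) :=
  PySem.Dict.ofList
    [("round", PySem.Set.ofList ["round", "oval", "square"]),
     ("oval", PySem.Set.ofList ["oval", "round"]),
     ("capsule", PySem.Set.ofList ["capsule", "oblong"]),
     ("oblong", PySem.Set.ofList ["oblong", "capsule"]),
     ("square", PySem.Set.ofList ["square", "round"])]

def shapes_similar_py_alt (shape1 : String) (shape2 : String) : Bool :=
  PySem.Set.contains (PySem.Dict.getD shapesNeighbors shape1 PySem.Set.empty) shape2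

-- ===== PRECONDITION & SPEC =====
def Spec_shapes_similar_py (shape1 : String) (shape2 : String) (out : Bool) : Prop := out = shapes_similar_py_alt shape1 shape2
instance (shape1 : String) (shape2 : String) (out : Bool) : Decidable (Spec_shapes_similar_py shape1 shape2 out) := by unfold Spec_shapes_similar_py; infer_instance

-- ===== CLAIM (what is proved, stated in full; the proofs are below) =====
def Claim_equal_shapes_similar_py : Prop := ∀ (shape1 : String) (shape2 : String), Dom_shapes_similar_py shape1 shape2 → Spec_shapes_similar_py shape1 shape2 (shapes_similar_py shape1 shape2)

-- ===== LEMMAS AND PROOFS =====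

-- ===== VERDICT (by name: the statement is the Claim_ definition above) =====
set_option maxHeartbeats 2000000 in
theorem shapes_similar_py_spec : Claim_equal_shapes_similar_py := by
  intro s1 s2 _
  unfold Spec_shapes_similar_py shapes_similar_py shapes_similar_py_alt
  have e1 : (PySem.Set.ofList ["round", "oval"] : PySem.Set String) = ["round", "oval"] := rfl
  have e2 : (PySem.Set.ofList ["capsule", "oblong"] : PySem.Set String) = ["capsule", "oblong"] := rfl
  have e3 : (PySem.Set.ofList ["square", "round"] : PySem.Set String) = ["square", "round"] := rfl
  have e4 : shapesNeighbors = PySem.Dict.mk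
      [("round", ["round", "oval", "square"]), ("oval", ["oval", "round"]),
       ("capsule", ["capsule", "oblong"]), ("oblong", ["oblong", "capsule"]),
       ("square", ["square", "round"])] := rfl
  rw [e1, e2, e3, e4]
  simp only [shapesSimilarLoopA]
  by_cases h1 : s1 = "round" <;> by_cases h2 : s1 = "oval" <;>
    by_cases h3 : s1 = "capsule" <;> by_cases h4 : s1 = "oblong" <;>
    by_cases h5 : s1 = "square" <;>
  · subst_vars <;>
    by_cases g1 : s2 = "round" <;> by_cases g2 : s2 = "oval" <;>
      by_cases g3 : s2 = "capsule" <;> by_cases g4 : s2 = "oblong" <;>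
      by_cases g5 : s2 = "square" <;>
    first
    | decide
    | (subst_vars
       simp_all [PySem.Dict.getD, PySem.Dict.get?, PySem.Set.empty]
       try tauto
       done)
    | (simp_all [PySem.Dict.getD, PySem.Dict.get?, PySem.Set.empty,
         beq_iff_eq, Ne.symm h1, Ne.symm h2, Ne.symm h3, Ne.symm h4, Ne.symm h5]
       try tauto
       done)
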